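-- pv_equiv track=rewrite | github.com/javierlopeza/IIC1103-2014-2 | Tareas/Tarea 2/doctor/codificarfinal.py | cadena_de_inicio_decodificar
-- ===== SOURCE A (Python) =====
-- def cadena_de_inicio_decodificar(aleator):
--     aleatoria=aleator
--     cadenainicio=""
--     clave="38872805571643309"
--     listainicio=[]
--     while len(cadenainicio)<=256:
--         cadenainicio+=clave
--         cadenainicio+=aleatoria
--     if len(cadenainicio)>256:
--         cadenainicio=cadenainicio[0:256]
--     for i in cadenainicio:
--         listainicio.append(i)
--     return listainicio
-- ===== SOURCE B (Python) =====
-- def cadena_de_inicio_decodificar(aleator):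
--     unit = "38872805571643309" + aleator
--     m = len(unit)
--     return [unit[i % m] for i in range(256)]
-- ===== Notes on version B (the rewrite author's own statement) =====
-- stated objective: simpler
-- what changed: B never builds a repeated string: it computes each of the 256 output characters directly by modular indexing into the period clave+aleator, replacing A's grow-until-long-enough accumulation, truncation and copy loop.
import Mathlib
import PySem

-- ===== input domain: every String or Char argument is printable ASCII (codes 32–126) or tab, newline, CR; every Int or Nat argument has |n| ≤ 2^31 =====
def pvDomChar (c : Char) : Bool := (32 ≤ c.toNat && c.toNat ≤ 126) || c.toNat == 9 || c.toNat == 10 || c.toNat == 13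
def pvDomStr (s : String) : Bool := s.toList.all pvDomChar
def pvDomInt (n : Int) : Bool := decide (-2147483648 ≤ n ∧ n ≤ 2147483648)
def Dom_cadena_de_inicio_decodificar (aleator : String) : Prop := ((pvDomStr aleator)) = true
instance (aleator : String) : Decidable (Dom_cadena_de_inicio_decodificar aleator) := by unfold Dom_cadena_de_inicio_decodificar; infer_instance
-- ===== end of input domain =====

-- B computes each of the 256 output characters by modular indexing into the period clave+aleator, instead of A's grow-and-truncate accumulation (objective: simpler).


-- ===== PORT A =====
-- the constant clave = "38872805571643309" as a char list
def pvClave : List Char := "38872805571643309".toList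

-- A's while loop: while len(cadenainicio) <= 256: cadenainicio += clave; cadenainicio += aleatoria
def pvLoopA (aleat : List Char) (acc : List Char) : List Char :=
  if acc.length ≤ 256 then pvLoopA aleat ((acc ++ pvClave) ++ aleat) else acc
termination_by 257 - acc.length
decreasing_by simp [pvClave]; omega

def cadena_de_inicio_decodificar (aleator : String) : List String :=
  let cadenainicio := pvLoopA aleator.toList []
  -- cadenainicio[0:256] for nonnegative bounds is List.take 256 (exact)
  let cadenainicio := if cadenainicio.length > 256 then cadenainicio.take 256 else cadenainicio
  cadenainicio.map (fun c => String.ofList [c])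

-- ===== PORT B =====
def cadena_de_inicio_decodificar_alt (aleator : String) : List String :=
  let unit := pvClave ++ aleator.toList
  let m := unit.length
  -- range(256) over nonnegative ints → List.range 256 (exact); unit[i % m] has 0 ≤ i % m < m,
  -- so the Python index is always in range and getD with any default is exact
  (List.range 256).map (fun i => String.ofList [unit.getD (i % m) ' '])

-- ===== PRECONDITION & SPEC =====
def Spec_cadena_de_inicio_decodificar (aleator : String) (out : List String) : Prop := out = cadena_de_inicio_decodificar_alt aleator
instance (aleator : String) (out : List String) : Decidable (Spec_cadena_de_inicio_decodificar aleator out) := by unfold Spec_cadena_de_inicio_decodificar; infer_instance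

-- ===== CLAIM =====
def Claim_equal_cadena_de_inicio_decodificar : Prop := ∀ (aleator : String), Dom_cadena_de_inicio_decodificar aleator → Spec_cadena_de_inicio_decodificar aleator (cadena_de_inicio_decodificar aleator)

-- ===== LEMMAS AND PROOFS =====

-- powers of a unit, used only to characterize A's loop
def pvRep (u : List Char) (n : Nat) : List Char := (List.replicate n u).flatten

theorem pvRep_succ (u : List Char) (n : Nat) : pvRep u (n + 1) = pvRep u n ++ u := by
  simp [pvRep, List.replicate_succ', List.flatten_append]

theorem pvRep_succ_front (u : List Char) (n : Nat) : pvRep u (n + 1) = u ++ pvRep u n := by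
  simp [pvRep, List.replicate_succ]

-- the loop started on a power of the unit returns a power of the unit, of length > 256
theorem pvLoopA_rep (aleat : List Char) :
    ∀ m (j : Nat), 257 - (pvRep (pvClave ++ aleat) j).length ≤ m →
      ∃ t, pvLoopA aleat (pvRep (pvClave ++ aleat) j) = pvRep (pvClave ++ aleat) t ∧
           256 < (pvRep (pvClave ++ aleat) t).length := by
  intro m
  induction m with
  | zero =>
    intro j hj
    rw [pvLoopA]
    have hlen : ¬ (pvRep (pvClave ++ aleat) j).length ≤ 256 := by omega
    simp only [hlen, if_false]
    exact ⟨j, rfl, by omega⟩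
  | succ k ih =>
    intro j hj
    rw [pvLoopA]
    by_cases h : (pvRep (pvClave ++ aleat) j).length ≤ 256
    · simp only [h, if_true]
      have heq : (pvRep (pvClave ++ aleat) j ++ pvClave) ++ aleat
          = pvRep (pvClave ++ aleat) (j + 1) := by
        rw [pvRep_succ, List.append_assoc]
      rw [heq]
      apply ih
      have h17 : pvClave.length = 17 := by decide
      have h1 : (pvRep (pvClave ++ aleat) (j + 1)).length
          = (pvRep (pvClave ++ aleat) j).length + (pvClave ++ aleat).length := by
        rw [pvRep_succ]; simp
      have hu : 17 ≤ (pvClave ++ aleat).length := by simp [h17]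
      omega
    · simp only [h, if_false]
      exact ⟨j, rfl, by omega⟩

-- the i-th character of a power of u is u[i % u.length]
theorem pvRep_getElem (u : List Char) (t i : Nat) (h : i < (pvRep u t).length)
    (hu : 0 < u.length) :
    (pvRep u t)[i] = u[i % u.length]'(Nat.mod_lt i hu) := by
  induction t generalizing i with
  | zero => simp [pvRep] at h
  | succ n ih =>
    have hfront := pvRep_succ_front u n
    by_cases hi : i < u.length
    · have : (pvRep u (n+1))[i] = u[i]'hi := by
        simp [hfront, hi]
      rw [this]
      congr 1
      exact (Nat.mod_eq_of_lt hi).symm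
    · rw [Nat.not_lt] at hi
      have hlen : (pvRep u (n+1)).length = u.length + (pvRep u n).length := by
        rw [hfront]; simp
      have h' : i - u.length < (pvRep u n).length := by omega
      have : (pvRep u (n+1))[i] = (pvRep u n)[i - u.length]'h' := by
        simp [hfront, List.getElem_append, Nat.not_lt.mpr hi]
      rw [this, ih _ h']
      congr 1
      exact (Nat.mod_eq_sub_mod hi).symm

-- the first 256 chars of a long-enough power are given by modular indexing
theorem take_rep (u : List Char) (t : Nat) (hu : 0 < u.length)
    (ht : 256 ≤ (pvRep u t).length) :
    (pvRep u t).take 256 = (List.range 256).map (fun i => u.getD (i % u.length) ' ') := by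
  apply List.ext_getElem
  · simp; omega
  · intro i h1 h2
    have hi : i < 256 := by simpa using h2
    have hit : i < (pvRep u t).length := by omega
    have hmod : i % u.length < u.length := Nat.mod_lt i hu
    simp only [List.getElem_take, List.getElem_map, List.getElem_range]
    rw [pvRep_getElem u t i hit hu, List.getD_eq_getElem u ' ' hmod]

-- ===== VERDICT =====
theorem cadena_de_inicio_decodificar_spec : Claim_equal_cadena_de_inicio_decodificar := by
  intro aleator _
  unfold Spec_cadena_de_inicio_decodificar cadena_de_inicio_decodificar cadena_de_inicio_decodificar_alt
  have h0 : ([] : List Char) = pvRep (pvClave ++ aleator.toList) 0 := by simp [pvRep]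
  obtain ⟨t, ht, hlen⟩ := pvLoopA_rep aleator.toList 257 0 (by simp [pvRep])
  have h17 : pvClave.length = 17 := by decide
  have hu : 0 < (pvClave ++ aleator.toList).length := by simp [h17]
  simp only
  rw [h0, ht]
  simp only [hlen, if_true]
  rw [take_rep _ t hu (by omega), List.map_map]
  simp [pvRep]
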